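-- pv_equiv track=rewrite | github.com/mungewrath/pcpr_extract | src/path_report.py | _max_candidate
-- ===== SOURCE A (Python) =====
-- def _max_candidate(candidates):
--     full_support_candidates = [c for c in candidates if c[1] == 3]
--     two_support_candidates = [c for c in candidates if c[1] == 2]
--     total_only_candidates = [c for c in candidates if c[1] == 1]
--
--     # in order of support priority, sort by highest total and then highest primary
--     if full_support_candidates:
--         return sorted(full_support_candidates, key=lambda x: (x[0][0],x[0][2]), reverse=True)[
--             0]  # get candidate with highest primary gleason)
--     elif two_support_candidates:
--         return sorted(two_support_candidates, key=lambda x: (x[0][0],x[0][2]), reverse=True)[0]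
--     elif total_only_candidates:
--         return sorted(total_only_candidates, key=lambda x: (x[0][0],x[0][2]), reverse=True)[0]
--     return None
-- ===== SOURCE B (Python) =====
-- def _max_candidate(candidates):
--     # single pass: find the best supported tier present, then one max over that tier
--     tiers = [c[1] for c in candidates if c[1] in (1, 2, 3)]
--     if not tiers:
--         return None
--     best = max(tiers)
--     return max((c for c in candidates if c[1] == best),
--                key=lambda c: (c[0][0], c[0][2]))
-- ===== Notes on version B (the rewrite author's own statement) =====
-- stated objective: simpler
-- what changed: Replaces the three filtered lists with a three-way branch each doing a stable reverse sort by a second pass, by computing the best tier present and taking a single max (first maximal element) of that tier in one pass, no sorting.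
-- outside the precondition, e.g. on _max_candidate([([5], 3)]): A raises IndexError, B raises IndexError
import Mathlib
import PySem

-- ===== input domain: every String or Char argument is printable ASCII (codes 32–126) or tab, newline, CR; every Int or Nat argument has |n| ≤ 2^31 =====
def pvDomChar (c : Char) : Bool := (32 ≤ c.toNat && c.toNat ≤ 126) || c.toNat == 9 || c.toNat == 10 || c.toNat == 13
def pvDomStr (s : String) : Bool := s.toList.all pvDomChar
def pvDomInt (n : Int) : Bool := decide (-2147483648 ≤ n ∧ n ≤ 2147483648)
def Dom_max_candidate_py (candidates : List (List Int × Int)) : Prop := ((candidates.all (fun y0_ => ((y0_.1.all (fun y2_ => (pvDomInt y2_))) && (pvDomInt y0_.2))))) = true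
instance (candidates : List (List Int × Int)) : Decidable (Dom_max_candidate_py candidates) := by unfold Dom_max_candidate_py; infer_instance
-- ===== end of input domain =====

-- B computes the best supported tier present and takes one max (first maximal) over it,
-- replacing A's three filter-branch-and-stable-reverse-sort passes; simpler decomposition.


-- ===== PORT A =====
-- key (x[0][0], x[0][2]); pyGetD 0 stands for the indexings, exact on Pre_ (indices in range there)
def max_candidate_py (candidates : List (List Int × Int)) : Option (List Int × Int) :=
  let full_support_candidates := candidates.filter (fun c => c.2 == 3)
  let two_support_candidates := candidates.filter (fun c => c.2 == 2)
  let total_only_candidates := candidates.filter (fun c => c.2 == 1)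
  if full_support_candidates ≠ [] then
    PySem.List.pyGet? (PySem.List.sorted2 full_support_candidates
      (fun x => PySem.List.pyGetD x.1 0 0) (fun x => PySem.List.pyGetD x.1 2 0) true) 0
  else if two_support_candidates ≠ [] then
    PySem.List.pyGet? (PySem.List.sorted2 two_support_candidates
      (fun x => PySem.List.pyGetD x.1 0 0) (fun x => PySem.List.pyGetD x.1 2 0) true) 0
  else if total_only_candidates ≠ [] then
    PySem.List.pyGet? (PySem.List.sorted2 total_only_candidates
      (fun x => PySem.List.pyGetD x.1 0 0) (fun x => PySem.List.pyGetD x.1 2 0) true) 0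
  else none

-- ===== PORT B =====
def max_candidate_py_alt (candidates : List (List Int × Int)) : Option (List Int × Int) :=
  let tiers := (candidates.filter (fun c => c.2 == 1 || c.2 == 2 || c.2 == 3)).map (fun c => c.2)
  if tiers = [] then none
  else
    match PySem.List.max? tiers (fun x => x) with
    | none => none
    | some best =>
      PySem.List.max2? (candidates.filter (fun c => c.2 == best))
        (fun c => PySem.List.pyGetD c.1 0 0) (fun c => PySem.List.pyGetD c.1 2 0)

-- ===== PRECONDITION & SPEC =====
-- Pre_ excludes exactly the inputs where Python A raises IndexError: a candidate of the
-- selected tier (the best tier among 3 > 2 > 1 that is present) whose list has < 3 entries,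
-- on which the sort key x[0][0], x[0][2] raises.
def Pre_max_candidate_py (candidates : List (List Int × Int)) : Prop :=
  ((∃ c ∈ candidates, c.2 = 3) → ∀ c ∈ candidates, c.2 = 3 → 3 ≤ c.1.length) ∧
  ((¬ (∃ c ∈ candidates, c.2 = 3) ∧ ∃ c ∈ candidates, c.2 = 2) →
      ∀ c ∈ candidates, c.2 = 2 → 3 ≤ c.1.length) ∧
  ((¬ (∃ c ∈ candidates, c.2 = 3) ∧ ¬ (∃ c ∈ candidates, c.2 = 2) ∧ ∃ c ∈ candidates, c.2 = 1) →
      ∀ c ∈ candidates, c.2 = 1 → 3 ≤ c.1.length)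
instance (candidates : List (List Int × Int)) : Decidable (Pre_max_candidate_py candidates) := by
  unfold Pre_max_candidate_py; infer_instance

def pvWitness_max_candidate_py : (List (List Int × Int)) := [([7, 0, 6], 2), ([5], 0)]

def Spec_max_candidate_py (candidates : List (List Int × Int)) (out : Option (List Int × Int)) : Prop := out = max_candidate_py_alt candidates
instance (candidates : List (List Int × Int)) (out : Option (List Int × Int)) : Decidable (Spec_max_candidate_py candidates out) := by unfold Spec_max_candidate_py; infer_instance

-- ===== CLAIM (what is proved, stated in full; the proofs are below) =====
def Claim_equal_max_candidate_py : Prop := ∀ (candidates : List (List Int × Int)), Dom_max_candidate_py candidates → Pre_max_candidate_py candidates → Spec_max_candidate_py candidates (max_candidate_py candidates)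

-- ===== LEMMAS AND PROOFS =====

-- the lexicographic "strictly better" test shared by sorted2 (reverse) and max2?
def pvLt (k1 k2 : List Int × Int → Int) (a b : List Int × Int) : Bool :=
  decide (k1 a < k1 b) || (!decide (k1 b < k1 a) && decide (k2 a < k2 b))

theorem head?_insertBy (k1 k2 : List Int × Int → Int) (x : List Int × Int)
    (s : List (List Int × Int)) :
    (PySem.List.insertBy (fun a b => pvLt k1 k2 b a) x s).head? =
      some (match s.head? with
            | none => x
            | some m => if pvLt k1 k2 m x then x else m) := by
  cases s with
  | nil => simp [PySem.List.insertBy]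
  | cons m t =>
    simp only [PySem.List.insertBy, List.head?]
    by_cases h : pvLt k1 k2 m x <;> simp [h]

theorem head?_foldl_insertBy (k1 k2 : List Int × Int → Int) (xs s : List (List Int × Int)) :
    (xs.foldl (fun acc x => PySem.List.insertBy (fun a b => pvLt k1 k2 b a) x acc) s).head? =
      xs.foldl (fun acc x =>
        match acc with
        | none => some x
        | some m => if pvLt k1 k2 m x then some x else some m) s.head? := by
  induction xs generalizing s with
  | nil => rfl
  | cons x xs ih =>
    simp only [List.foldl]
    rw [ih]
    rw [head?_insertBy]
    cases s with
    | nil => rfl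
    | cons m t =>
      simp only [List.head?]
      by_cases h : pvLt k1 k2 m x <;> simp [h]

theorem head?_sorted2_rev (k1 k2 : List Int × Int → Int) (xs : List (List Int × Int)) :
    (PySem.List.sorted2 xs k1 k2 true).head? = PySem.List.max2? xs k1 k2 := by
  have e1 : PySem.List.sorted2 xs k1 k2 true =
      xs.foldl (fun acc x => PySem.List.insertBy (fun a b => pvLt k1 k2 b a) x acc) [] := rfl
  have e2 : PySem.List.max2? xs k1 k2 =
      xs.foldl (fun acc x =>
        match acc with
        | none => some x
        | some m => if pvLt k1 k2 m x then some x else some m) none := by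
    unfold PySem.List.max2?
    congr 1
    funext acc x
    cases acc <;> rfl
  rw [e1, e2]
  exact head?_foldl_insertBy k1 k2 xs []

-- max? over the id key of a list of tiers picks an element that is present and maximal
theorem max?_id_spec (xs : List Int) (hne : xs ≠ []) :
    ∃ m, PySem.List.max? xs (fun x => x) = some m ∧ m ∈ xs ∧ ∀ y ∈ xs, y ≤ m := by
  obtain ⟨m, hm⟩ := Option.ne_none_iff_exists'.mp
    (fun h => hne ((PySem.List.max?_eq_none_iff xs (fun x : Int => x)).mp h))
  exact ⟨m, hm, PySem.List.max?_mem hm, PySem.List.max?_isMax hm⟩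

-- when tier t is the best in-range tier present, B collapses to max2? over that tier's filter
theorem alt_eq_max2 (cs : List (List Int × Int)) (t : Int) (ht : t = 1 ∨ t = 2 ∨ t = 3)
    (hpresent : cs.filter (fun c => c.2 == t) ≠ [])
    (hmax : ∀ c ∈ cs, (c.2 = 1 ∨ c.2 = 2 ∨ c.2 = 3) → c.2 ≤ t) :
    max_candidate_py_alt cs =
      PySem.List.max2? (cs.filter (fun c => c.2 == t))
        (fun c => PySem.List.pyGetD c.1 0 0) (fun c => PySem.List.pyGetD c.1 2 0) := by
  have hex : ∃ c ∈ cs, c.2 = t := by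
    rcases List.exists_mem_of_ne_nil _ hpresent with ⟨c0, hc0⟩
    rcases List.mem_filter.mp hc0 with ⟨hc0m, hc0t⟩
    exact ⟨c0, hc0m, by simpa using hc0t⟩
  obtain ⟨c0, hc0m, hc0t⟩ := hex
  have htier : t ∈ (cs.filter (fun c => c.2 == 1 || c.2 == 2 || c.2 == 3)).map (fun c => c.2) := by
    refine List.mem_map.mpr ⟨c0, List.mem_filter.mpr ⟨hc0m, ?_⟩, hc0t⟩
    rcases ht with h | h | h <;> simp [hc0t, h]
  have htne : (cs.filter (fun c => c.2 == 1 || c.2 == 2 || c.2 == 3)).map (fun c => c.2) ≠ [] :=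
    List.ne_nil_of_mem htier
  obtain ⟨m, hm, hmmem, hmax'⟩ := max?_id_spec _ htne
  have hm_le : m ≤ t := by
    rcases List.mem_map.mp hmmem with ⟨c1, hc1, hc1m⟩
    rcases List.mem_filter.mp hc1 with ⟨hc1m', hc1p⟩
    have : c1.2 = 1 ∨ c1.2 = 2 ∨ c1.2 = 3 := by
      rcases Bool.or_eq_true_iff.mp hc1p with h | h
      · rcases Bool.or_eq_true_iff.mp h with h' | h'
        · exact Or.inl (by simpa using h')
        · exact Or.inr (Or.inl (by simpa using h'))
      · exact Or.inr (Or.inr (by simpa using h))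
    have := hmax c1 hc1m' this
    omega
  have hmt : m = t := le_antisymm hm_le (hmax' t htier)
  unfold max_candidate_py_alt
  simp only [htne, hm, hmt]
  rfl


theorem max_candidate_py_spec : Claim_equal_max_candidate_py := by
  intro cs _ _
  unfold Spec_max_candidate_py max_candidate_py
  by_cases h3 : cs.filter (fun c => c.2 == 3) = []
  · by_cases h2 : cs.filter (fun c => c.2 == 2) = []
    · by_cases h1 : cs.filter (fun c => c.2 == 1) = []
      · -- no in-range tier at all: both sides none
        have htnil : (cs.filter (fun c => c.2 == 1 || c.2 == 2 || c.2 == 3)).map (fun c => c.2) = [] := by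
          rw [List.map_eq_nil_iff, List.filter_eq_nil_iff]
          intro c hc
          have e3 := List.filter_eq_nil_iff.mp h3 c hc
          have e2 := List.filter_eq_nil_iff.mp h2 c hc
          have e1 := List.filter_eq_nil_iff.mp h1 c hc
          simp at e1 e2 e3 ⊢
          tauto
        simp [h3, h2, h1, max_candidate_py_alt, htnil]
      · -- tier 1 only
        have hmax : ∀ c ∈ cs, (c.2 = 1 ∨ c.2 = 2 ∨ c.2 = 3) → c.2 ≤ 1 := by
          intro c hc hr
          have e3 := List.filter_eq_nil_iff.mp h3 c hc
          have e2 := List.filter_eq_nil_iff.mp h2 c hc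
          simp at e2 e3
          omega
        rw [alt_eq_max2 cs 1 (by omega) h1 hmax, ← head?_sorted2_rev]
        simp [h3, h2, h1, PySem.List.pyGet?_zero, List.head?_eq_getElem?]
    · -- tier 2 best
      have hmax : ∀ c ∈ cs, (c.2 = 1 ∨ c.2 = 2 ∨ c.2 = 3) → c.2 ≤ 2 := by
        intro c hc hr
        have e3 := List.filter_eq_nil_iff.mp h3 c hc
        simp at e3
        omega
      rw [alt_eq_max2 cs 2 (by omega) h2 hmax, ← head?_sorted2_rev]
      simp [h3, h2, PySem.List.pyGet?_zero, List.head?_eq_getElem?]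
  · -- tier 3 best
    have hmax : ∀ c ∈ cs, (c.2 = 1 ∨ c.2 = 2 ∨ c.2 = 3) → c.2 ≤ 3 := by
      intro c hc hr; omega
    rw [alt_eq_max2 cs 3 (by omega) h3 hmax, ← head?_sorted2_rev]
    simp [h3, PySem.List.pyGet?_zero, List.head?_eq_getElem?]

-- ===== VERDICT (by name: the statement is the Claim_ definition above) =====
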